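-- pv_equiv track=rewrite | github.com/koushik-royal/python | ASSIGNMNET 3 3Q.py | sum_boundary_elements
-- ===== SOURCE A (Python) =====
-- def sum_boundary_elements(matrix):
--     if not matrix:
--         return 0
--
--     M = len(matrix)
--     N = len(matrix[0])
--
--     if M == 1:
--         return sum(matrix[0])
--     if N == 1:
--         return sum(row[0] for row in matrix)
--
--     boundary_sum = 0
--
--     # Sum of the first row
--     boundary_sum += sum(matrix[0])
--
--     # Sum of the last row
--     boundary_sum += sum(matrix[M-1])
--
--     # Sum of the first column (excluding first and last element if they are already included)
--     for i in range(1, M-1):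
--         boundary_sum += matrix[i][0]
--
--     # Sum of the last column (excluding first and last element if they are already included)
--     for i in range(1, M-1):
--         boundary_sum += matrix[i][N-1]
--
--     return boundary_sum
-- ===== SOURCE B (Python) =====
-- def sum_boundary_elements(matrix):
--     if not matrix:
--         return 0
--     M = len(matrix)
--     N = len(matrix[0])
--     total = 0
--     for i in range(M):
--         for j in range(N):
--             if i == 0 or i == M - 1 or j == 0 or j == N - 1:
--                 total += matrix[i][j]
--     return total
-- ===== Notes on version B (the rewrite author's own statement) =====
-- stated objective: simpler
-- what changed: B replaces A's case-split boundary walk (empty/single-row/single-column special cases plus first-row, last-row and two column loops) with one uniform full-grid scan that adds matrix[i][j] exactly when (i,j) lies on the border.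
-- outside the precondition, e.g. on sum_boundary_elements([[1, 2], [3, 4, 5]]): A returns 15, B returns 10; on sum_boundary_elements([[], []]): A returns 0, B returns 0
import Mathlib
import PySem

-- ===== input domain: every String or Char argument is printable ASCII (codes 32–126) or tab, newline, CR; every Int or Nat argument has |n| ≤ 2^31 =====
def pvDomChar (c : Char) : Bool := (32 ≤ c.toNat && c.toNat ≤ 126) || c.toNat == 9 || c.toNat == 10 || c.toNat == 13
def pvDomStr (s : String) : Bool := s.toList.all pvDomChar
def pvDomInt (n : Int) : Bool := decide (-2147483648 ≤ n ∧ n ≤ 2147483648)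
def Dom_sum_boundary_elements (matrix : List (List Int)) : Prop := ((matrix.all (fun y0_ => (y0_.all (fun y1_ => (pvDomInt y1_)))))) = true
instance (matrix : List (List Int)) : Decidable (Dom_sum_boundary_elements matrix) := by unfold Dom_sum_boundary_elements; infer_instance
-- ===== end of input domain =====

-- B replaces A's case-split boundary walk with one uniform full-grid scan using a border
-- predicate; same values on rectangular matrices with nonempty rows (Pre_), not faster.


-- ===== PORT A =====
def sum_boundary_elements (matrix : List (List Int)) : Int :=
  if matrix = [] then 0
  else
    let M : Int := matrix.length
    let N : Int := (PySem.List.pyGetD matrix 0 []).length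
    if M = 1 then (PySem.List.pyGetD matrix 0 []).sum
    else if N = 1 then (matrix.map (fun row => PySem.List.pyGetD row 0 0)).sum
    else
      let s0 : Int := 0 + (PySem.List.pyGetD matrix 0 []).sum
      let s1 : Int := s0 + (PySem.List.pyGetD matrix (M - 1) []).sum
      let s2 : Int := (PySem.List.pyRange 1 (M - 1) 1).foldl
        (fun acc i => acc + PySem.List.pyGetD (PySem.List.pyGetD matrix i []) 0 0) s1
      (PySem.List.pyRange 1 (M - 1) 1).foldl
        (fun acc i => acc + PySem.List.pyGetD (PySem.List.pyGetD matrix i []) (N - 1) 0) s2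

-- ===== PORT B =====
def sum_boundary_elements_alt (matrix : List (List Int)) : Int :=
  if matrix = [] then 0
  else
    let M : Int := matrix.length
    let N : Int := (PySem.List.pyGetD matrix 0 []).length
    (PySem.List.pyRange 0 M 1).foldl (fun total i =>
      (PySem.List.pyRange 0 N 1).foldl (fun t j =>
        if i = 0 ∨ i = M - 1 ∨ j = 0 ∨ j = N - 1 then
          t + PySem.List.pyGetD (PySem.List.pyGetD matrix i []) j 0
        else t) total) 0

-- ===== PRECONDITION & SPEC =====
-- Pre_ excludes multi-row matrices whose first row is empty or that are ragged below the first
-- row's width N (some row shorter than N: A raises IndexError or reads wrapped [-1] indices;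
-- last row longer than N: A accidentally sums its trailing elements, which B's border scan
-- never visits) — all artefacts of A's targeted boundary walk.
def Pre_sum_boundary_elements (matrix : List (List Int)) : Prop :=
  matrix = [] ∨ matrix.length = 1 ∨
    (1 ≤ matrix.headI.length ∧ (∀ row ∈ matrix, matrix.headI.length ≤ row.length) ∧
      (matrix.headI.length = 1 ∨ (matrix.getLast?.getD []).length = matrix.headI.length))
instance (matrix : List (List Int)) : Decidable (Pre_sum_boundary_elements matrix) := by
  unfold Pre_sum_boundary_elements; infer_instance

def pvWitness_sum_boundary_elements : List (List Int) := [[1, 2, 3], [4, 5, 6], [7, 8, 9]]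

def Spec_sum_boundary_elements (matrix : List (List Int)) (out : Int) : Prop := out = sum_boundary_elements_alt matrix
instance (matrix : List (List Int)) (out : Int) : Decidable (Spec_sum_boundary_elements matrix out) := by unfold Spec_sum_boundary_elements; infer_instance

-- ===== CLAIM (what is proved, stated in full; the proofs are below) =====
def Claim_equal_sum_boundary_elements : Prop := ∀ (matrix : List (List Int)), Dom_sum_boundary_elements matrix → Pre_sum_boundary_elements matrix → Spec_sum_boundary_elements matrix (sum_boundary_elements matrix)

-- ===== LEMMAS AND PROOFS =====

lemma lem_inner (mx : List (List Int)) (M N i : Int) (total : Int) :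
    (PySem.List.pyRange 0 N).foldl (fun t j =>
      if i = 0 ∨ i = M - 1 ∨ j = 0 ∨ j = N - 1 then
        t + PySem.List.pyGetD (PySem.List.pyGetD mx i []) j 0 else t) total
    = total + ((PySem.List.pyRange 0 N).map (fun j =>
      if i = 0 ∨ i = M - 1 ∨ j = 0 ∨ j = N - 1 then
        PySem.List.pyGetD (PySem.List.pyGetD mx i []) j 0 else 0)).sum := by
  rw [List.foldl_ext _ (fun t j =>
    t + if i = 0 ∨ i = M - 1 ∨ j = 0 ∨ j = N - 1 then
      PySem.List.pyGetD (PySem.List.pyGetD mx i []) j 0 else 0)]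
  · exact PySem.List.foldl_add _ _ _
  · intro a b _; split <;> simp

lemma S_full (mx : List (List Int)) (M N i : Int) (hb : i = 0 ∨ i = M - 1)
    (hlen : ((PySem.List.pyGetD mx i []).length : Int) = N) :
    ((PySem.List.pyRange 0 N).map (fun j =>
      if i = 0 ∨ i = M - 1 ∨ j = 0 ∨ j = N - 1 then
        PySem.List.pyGetD (PySem.List.pyGetD mx i []) j 0 else 0)).sum
    = (PySem.List.pyGetD mx i []).sum := by
  rw [List.map_congr_left (g := fun j => PySem.List.pyGetD (PySem.List.pyGetD mx i []) j 0)
    (by intro j _; rw [if_pos (by tauto)])]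
  rw [← hlen, PySem.List.map_pyGetD_pyRange_zero']

lemma S_middle (mx : List (List Int)) (M N i : Int) (h0 : i ≠ 0) (h1 : i ≠ M - 1) (hN : 2 ≤ N) :
    ((PySem.List.pyRange 0 N).map (fun j =>
      if i = 0 ∨ i = M - 1 ∨ j = 0 ∨ j = N - 1 then
        PySem.List.pyGetD (PySem.List.pyGetD mx i []) j 0 else 0)).sum
    = PySem.List.pyGetD (PySem.List.pyGetD mx i []) 0 0
      + PySem.List.pyGetD (PySem.List.pyGetD mx i []) (N - 1) 0 := by
  rw [PySem.List.pyRange_one_append 0 1 N (by omega) (by omega),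
      PySem.List.pyRange_one_append 1 (N - 1) N (by omega) (by omega)]
  have h01 : PySem.List.pyRange 0 1 = [0] := by
    simpa using PySem.List.pyRange_one_singleton 0
  have hNN : PySem.List.pyRange (N - 1) N = [N - 1] := by
    have := PySem.List.pyRange_one_singleton (N - 1)
    rwa [show N - 1 + 1 = N by ring] at this
  rw [h01, hNN]
  simp only [List.map_append, List.sum_append]
  have hmid : ((PySem.List.pyRange 1 (N - 1)).map (fun j =>
      if i = 0 ∨ i = M - 1 ∨ j = 0 ∨ j = N - 1 then
        PySem.List.pyGetD (PySem.List.pyGetD mx i []) j 0 else 0)).sum = 0 := by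
    apply List.sum_eq_zero
    intro x hx
    obtain ⟨j, hj, rfl⟩ := List.mem_map.mp hx
    rw [PySem.List.mem_pyRange_one] at hj
    rw [if_neg (by omega)]
  rw [hmid]
  simp only [List.map_cons, List.map_nil, List.sum_cons, List.sum_nil]
  rw [if_pos (by tauto), if_pos (by tauto)]
  ring
lemma B_eq_sum (mx : List (List Int)) (h : ¬ mx = []) :
    sum_boundary_elements_alt mx =
      ((PySem.List.pyRange 0 (mx.length : Int)).map (fun i =>
        ((PySem.List.pyRange 0 ((PySem.List.pyGetD mx 0 []).length : Int)).map (fun j =>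
          if i = 0 ∨ i = (mx.length : Int) - 1 ∨ j = 0 ∨ j = ((PySem.List.pyGetD mx 0 []).length : Int) - 1
          then PySem.List.pyGetD (PySem.List.pyGetD mx i []) j 0 else 0)).sum)).sum := by
  unfold sum_boundary_elements_alt
  rw [if_neg h]
  rw [List.foldl_ext _ (fun total i =>
    total + ((PySem.List.pyRange 0 ((PySem.List.pyGetD mx 0 []).length : Int)).map (fun j =>
      if i = 0 ∨ i = (mx.length : Int) - 1 ∨ j = 0 ∨ j = ((PySem.List.pyGetD mx 0 []).length : Int) - 1
      then PySem.List.pyGetD (PySem.List.pyGetD mx i []) j 0 else 0)).sum)]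
  · rw [PySem.List.foldl_add]; ring
  · intro a b _; exact lem_inner mx _ _ b a

theorem main (mx : List (List Int)) (hpre : Pre_sum_boundary_elements mx) :
    sum_boundary_elements mx = sum_boundary_elements_alt mx := by
  by_cases hmx : mx = []
  · subst hmx; rfl
  obtain ⟨r0, rest, rfl⟩ : ∃ a l, mx = a :: l := List.exists_cons_of_ne_nil hmx
  have hget0 : PySem.List.pyGetD (r0 :: rest) 0 [] = r0 := PySem.List.pyGetD_zero_cons _ _ _
  by_cases hrest : rest = []
  · -- M = 1: A returns sum(matrix[0]); B scans the single row, every cell on the border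
    subst hrest
    rw [B_eq_sum _ hmx]
    simp only [hget0, List.length_cons, List.length_nil]
    norm_num
    rw [List.map_congr_left (l := PySem.List.pyRange 0 1) (g := fun _ : ℤ => r0.sum)
      (by intro i hi
          rw [PySem.List.mem_pyRange_one] at hi
          have hi0 : i = 0 := by omega
          subst hi0
          beta_reduce
          rw [List.map_congr_left (g := fun j => PySem.List.pyGetD r0 j 0)
            (by intro j _; beta_reduce; rw [if_pos (by tauto), hget0])]
          rw [PySem.List.map_pyGetD_pyRange_zero'])]
    rw [show PySem.List.pyRange 0 1 = [0] by decide]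
    simp only [List.map_cons, List.map_nil, List.sum_cons, List.sum_nil, add_zero]
    unfold sum_boundary_elements
    rw [if_neg hmx]
    norm_num [hget0]
  · rcases hpre with h | h | ⟨hN1, -, hlastc⟩
    · exact absurd h hmx
    · exfalso
      cases rest with
      | nil => exact hrest rfl
      | cons b l => simp at h
    simp only [List.headI] at hN1 hlastc
    have hM2 : 2 ≤ (r0 :: rest).length := by
      cases rest with
      | nil => exact absurd rfl hrest
      | cons b l => simp [List.length_cons]
    have hMne1 : ((r0 :: rest).length : Int) ≠ 1 := by omega
    by_cases hNone : r0.length = 1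
    · -- N = 1
      rw [B_eq_sum _ hmx]
      simp only [hget0, hNone, Nat.cast_one]
      rw [show PySem.List.pyRange 0 1 = [0] by decide]
      simp only [List.map_cons, List.map_nil, List.sum_cons, List.sum_nil, add_zero]
      rw [List.map_congr_left (g := fun i => PySem.List.pyGetD (PySem.List.pyGetD (r0 :: rest) i []) 0 0)
        (by intro i _; rw [if_pos (by tauto)])]
      rw [show (fun i => PySem.List.pyGetD (PySem.List.pyGetD (r0 :: rest) i []) 0 0)
          = (fun row => PySem.List.pyGetD row 0 0) ∘ (fun i => PySem.List.pyGetD (r0 :: rest) i []) from rfl]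
      rw [← List.map_map, PySem.List.map_pyGetD_pyRange_zero']
      unfold sum_boundary_elements
      rw [if_neg hmx, if_neg hMne1, if_pos (by rw [hget0, hNone]; norm_num)]
    · -- M ≥ 2 and N ≥ 2: the general case
      have hN2 : 2 ≤ r0.length := by omega
      have hlast' : ((r0 :: rest).getLast?.getD []).length = r0.length := by tauto
      set M : Int := ((r0 :: rest).length : Int) with hM
      set N : Int := (r0.length : Int) with hNdef
      have hN2' : 2 ≤ N := by rw [hNdef]; exact_mod_cast hN2
      have hM2' : 2 ≤ M := by rw [hM]; exact_mod_cast hM2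
      have hgetL : PySem.List.pyGetD (r0 :: rest) (M - 1) [] = (r0 :: rest).getLast?.getD [] := by
        rw [PySem.List.pyGetD_eq_getElem _ _ (by omega) (by omega)]
        rw [List.getLast?_eq_getElem?]
        have hidx : (M - 1).toNat = (r0 :: rest).length - 1 := by omega
        simp only [hidx, List.getElem?_eq_getElem (show (r0 :: rest).length - 1 < (r0 :: rest).length by omega), Option.getD_some]
      have hlenL : ((PySem.List.pyGetD (r0 :: rest) (M - 1) []).length : Int) = N := by
        rw [hgetL, hlast']
      have hNne1 : N ≠ 1 := by omega
      have hMne1' : M ≠ 1 := by omega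
      -- A side
      simp only [sum_boundary_elements]
      rw [if_neg hmx]
      simp only [hget0, ← hM, ← hNdef]
      rw [if_neg hMne1', if_neg hNne1, PySem.List.foldl_add, PySem.List.foldl_add]
      -- B side
      rw [B_eq_sum _ hmx]
      simp only [hget0, ← hM, ← hNdef]
      rw [List.map_congr_left
        (f := fun i => ((PySem.List.pyRange 0 N).map (fun j =>
          if i = 0 ∨ i = M - 1 ∨ j = 0 ∨ j = N - 1 then
            PySem.List.pyGetD (PySem.List.pyGetD (r0 :: rest) i []) j 0 else 0)).sum)
        (l := PySem.List.pyRange 0 M)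
        (g := fun i =>
          if i = 0 ∨ i = M - 1 then (PySem.List.pyGetD (r0 :: rest) i []).sum
          else PySem.List.pyGetD (PySem.List.pyGetD (r0 :: rest) i []) 0 0
            + PySem.List.pyGetD (PySem.List.pyGetD (r0 :: rest) i []) (N - 1) 0)
        (by intro i hi
            beta_reduce
            rw [PySem.List.mem_pyRange_one] at hi
            by_cases hb : i = 0 ∨ i = M - 1
            · rw [if_pos hb]
              rcases hb with rfl | rfl
              · exact S_full _ _ _ _ (Or.inl rfl) (by rw [hget0])
              · exact S_full _ _ _ _ (Or.inr rfl) hlenL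
            · rw [if_neg hb]
              rw [not_or] at hb
              exact S_middle _ _ _ _ hb.1 hb.2 hN2')]
      rw [PySem.List.pyRange_one_append 0 1 M (by omega) (by omega),
          PySem.List.pyRange_one_append 1 (M - 1) M (by omega) (by omega)]
      rw [show PySem.List.pyRange 0 1 = [0] by decide]
      have hMM : PySem.List.pyRange (M - 1) M = [M - 1] := by
        have := PySem.List.pyRange_one_singleton (M - 1)
        rwa [show M - 1 + 1 = M by ring] at this
      rw [hMM]
      simp only [List.map_append, List.sum_append, List.map_cons, List.map_nil,
        List.sum_cons, List.sum_nil, add_zero, true_or, or_true,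
        if_true, hget0]
      rw [List.map_congr_left
        (f := fun i =>
          if i = 0 ∨ i = M - 1 then (PySem.List.pyGetD (r0 :: rest) i []).sum
          else PySem.List.pyGetD (PySem.List.pyGetD (r0 :: rest) i []) 0 0
            + PySem.List.pyGetD (PySem.List.pyGetD (r0 :: rest) i []) (N - 1) 0)
        (l := PySem.List.pyRange 1 (M - 1))
        (g := fun i => PySem.List.pyGetD (PySem.List.pyGetD (r0 :: rest) i []) 0 0
            + PySem.List.pyGetD (PySem.List.pyGetD (r0 :: rest) i []) (N - 1) 0)
        (by intro i hi
            beta_reduce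
            rw [PySem.List.mem_pyRange_one] at hi
            rw [if_neg (by omega)])]
      rw [PySem.List.sum_map_add_int]
      ring

-- ===== VERDICT (by name: the statement is the Claim_ definition above) =====
theorem sum_boundary_elements_spec : Claim_equal_sum_boundary_elements := by
  intro matrix _ hpre
  unfold Spec_sum_boundary_elements
  exact main matrix hpre
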